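-- pv_equiv track=rewrite | github.com/pdotchen/python | CSE20/Assignment_4/Shape.py | extract_low_priority_name
-- ===== SOURCE A (Python) =====
-- def extract_low_priority_name(dictionary):
--     dict2 = dict()
--     for key in dictionary.keys():
--         if dictionary[key] not in dict2.keys():
--             dict2[dictionary[key]] = [key]
--         else:
--             dict2[dictionary[key]].append(key)
--
--     min_key = min(dict2.keys())
--     list_of_names = dict2[min_key]
--     low_priority_name = 'zzz'
--     for element in list_of_names:
--         if element < low_priority_name:
--             low_priority_name = element
--     return low_priority_name
-- ===== SOURCE B (Python) =====
-- def extract_low_priority_name(dictionary):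
--     m = min(dictionary.values())
--     return min(['zzz'] + [k for k in dictionary if dictionary[k] == m])
-- ===== Notes on version B (the rewrite author's own statement) =====
-- stated objective: simpler
-- what changed: B drops A's value->keys grouping dict entirely: it takes m = min(dictionary.values()) directly and returns min(['zzz'] + [k for k in dictionary if dictionary[k] == m]), two flat passes instead of group-then-lookup-then-scan.
-- outside the precondition, e.g. on extract_low_priority_name({}): A raises ValueError, B raises ValueError
import Mathlib
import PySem

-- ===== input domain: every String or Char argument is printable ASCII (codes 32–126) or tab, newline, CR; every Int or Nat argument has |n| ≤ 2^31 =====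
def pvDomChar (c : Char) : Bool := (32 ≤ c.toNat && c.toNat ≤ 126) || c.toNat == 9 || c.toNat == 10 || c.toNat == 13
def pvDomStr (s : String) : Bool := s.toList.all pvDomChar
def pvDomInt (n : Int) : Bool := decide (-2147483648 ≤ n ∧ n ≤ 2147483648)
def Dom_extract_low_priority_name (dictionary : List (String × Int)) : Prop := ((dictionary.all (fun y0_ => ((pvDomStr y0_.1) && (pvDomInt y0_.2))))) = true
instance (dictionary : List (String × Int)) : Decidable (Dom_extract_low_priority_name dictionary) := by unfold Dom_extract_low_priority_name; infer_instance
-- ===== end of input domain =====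

-- B computes min(values) directly and takes min('zzz', keys at that value), skipping A's value->keys grouping dict (objective: simpler).
-- Pre_ excludes the empty dict (A's min() raises ValueError) and association lists with duplicate keys, which do not represent a Python dict.


-- ===== PORT A =====
def extract_low_priority_name (dictionary : List (String × Int)) : String :=
  let d := PySem.Dict.mk dictionary
  let dict2 : PySem.Dict Int (List String) :=
    d.keys.foldl (fun d2 key =>
      let v := d.getD key 0       -- dictionary[key]; key is drawn from d.keys, so always present
      if d2.contains v = false then d2.insert v [key]           -- dict2[v] = [key]
      else d2.modify v [] (fun names => names ++ [key]))        -- dict2[v].append(key); v present, so dflt [] unused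
      PySem.Dict.empty
  let min_key := (PySem.List.min? dict2.keys (fun y => y)).getD 0   -- min() raises on empty; Pre_ excludes []
  let list_of_names := dict2.getD min_key []
  list_of_names.foldl (fun low_priority_name element =>
    if element < low_priority_name then element else low_priority_name) "zzz"

-- ===== PORT B =====
def extract_low_priority_name_alt (dictionary : List (String × Int)) : String :=
  let d := PySem.Dict.mk dictionary
  let m := (PySem.List.min? d.values (fun y => y)).getD 0           -- min() raises on empty; Pre_ excludes []
  (PySem.List.min? ("zzz" :: (d.keys.filter (fun k => d.getD k 0 == m))) (fun y => y)).getD "zzz"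

-- ===== PRECONDITION & SPEC =====
-- Pre_ excludes the empty list (A's min() raises ValueError there) and lists with duplicate keys,
-- which do not denote a Python dict (the programs only ever receive dicts).
def Pre_extract_low_priority_name (dictionary : List (String × Int)) : Prop :=
  dictionary ≠ [] ∧ (dictionary.map Prod.fst).Nodup
instance (dictionary : List (String × Int)) : Decidable (Pre_extract_low_priority_name dictionary) := by
  unfold Pre_extract_low_priority_name; infer_instance
def pvWitness_extract_low_priority_name : (List (String × Int)) := [("ann", 2), ("bob", 1), ("cat", 1)]
def Spec_extract_low_priority_name (dictionary : List (String × Int)) (out : String) : Prop := out = extract_low_priority_name_alt dictionary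
instance (dictionary : List (String × Int)) (out : String) : Decidable (Spec_extract_low_priority_name dictionary out) := by unfold Spec_extract_low_priority_name; infer_instance

-- ===== CLAIM (what is proved, stated in full; the proofs are below) =====
def Claim_equal_extract_low_priority_name : Prop := ∀ (dictionary : List (String × Int)), Dom_extract_low_priority_name dictionary → Pre_extract_low_priority_name dictionary → Spec_extract_low_priority_name dictionary (extract_low_priority_name dictionary)

-- ===== LEMMAS AND PROOFS =====

-- a key is in the grouping fold's dict iff it occurs among the pairs' keys (or was there already)
theorem pv_contains_fold (ql : List (Int × String)) (d : PySem.Dict Int (List String)) (x : Int) :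
    (ql.foldl (fun d2 q => d2.modify q.1 [] (fun names => names ++ [q.2])) d).contains x
      = (decide (x ∈ ql.map Prod.fst) || d.contains x) := by
  induction ql generalizing d with
  | nil => simp
  | cons q ql ih =>
      simp only [List.foldl_cons, ih, PySem.Dict.contains_modify, List.map_cons, List.mem_cons]
      simp [Bool.or_assoc, Bool.or_comm, Bool.or_left_comm, Bool.beq_eq_decide_eq]

-- the unique minimum of a nonempty Int list depends only on membership
theorem pv_min_getD_eq {xs ys : List Int} (hxs : xs ≠ []) (hys : ys ≠ [])
    (hmem : ∀ x, x ∈ xs ↔ x ∈ ys) :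
    (PySem.List.min? xs (fun y => y)).getD 0 = (PySem.List.min? ys (fun y => y)).getD 0 := by
  obtain ⟨m, hm⟩ : ∃ m, PySem.List.min? xs (fun y => y) = some m := by
    cases h : PySem.List.min? xs (fun y => y) with
    | none => exact absurd ((PySem.List.min?_eq_none_iff _ _).mp h) hxs
    | some m => exact ⟨m, rfl⟩
  obtain ⟨m', hm'⟩ : ∃ m', PySem.List.min? ys (fun y => y) = some m' := by
    cases h : PySem.List.min? ys (fun y => y) with
    | none => exact absurd ((PySem.List.min?_eq_none_iff _ _).mp h) hys
    | some m => exact ⟨m, rfl⟩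
  rw [hm, hm']
  simp only [Option.getD_some]
  exact le_antisymm
    (PySem.List.min?_isMin hm m' ((hmem m').mpr (PySem.List.min?_mem hm')))
    (PySem.List.min?_isMin hm' m ((hmem m).mp (PySem.List.min?_mem hm)))

-- A's running-min loop (strict '<', start s) is min of s :: t
theorem pv_fold_min_eq (t : List String) (s : String) :
    t.foldl (fun lp e => if e < lp then e else lp) s
      = (PySem.List.min? (s :: t) (fun y => y)).getD "zzz" := by
  rw [PySem.List.min?_id_cons]
  simp only [Option.getD_some]
  induction t generalizing s with
  | nil => rfl
  | cons a t ih =>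
      simp only [List.foldl_cons]
      rw [ih]
      congr 1
      by_cases h : a < s
      · rw [if_pos h, min_eq_right h.le]
      · rw [if_neg h, min_eq_left (not_lt.mp h)]

theorem extract_low_priority_name_main (l : List (String × Int)) (hne : l ≠ [])
    (hnd : (l.map Prod.fst).Nodup) :
    extract_low_priority_name l = extract_low_priority_name_alt l := by
  unfold extract_low_priority_name extract_low_priority_name_alt
  simp only [PySem.Dict.keys_mk, PySem.Dict.values_mk]
  -- the lookup into the original dict returns the pair's value (keys are Nodup)
  have hlook : ∀ p ∈ l, ∀ d0 : Int, (PySem.Dict.mk l).getD p.1 d0 = p.2 := by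
    intro p hp d0
    exact PySem.Dict.getD_of_mem_items (PySem.Dict.mk l) (by exact hp)
      (by simpa [PySem.Dict.keys_mk] using hnd) d0
  -- normalise A's grouping fold to a pure modify-fold over the pairs
  have hfold :
      (l.map Prod.fst).foldl (fun d2 key =>
          let v := (PySem.Dict.mk l).getD key 0
          if d2.contains v = false then d2.insert v [key]
          else d2.modify v [] (fun names => names ++ [key])) PySem.Dict.empty
        = (l.map (fun p => (p.2, p.1))).foldl
            (fun d2 q => d2.modify q.1 [] (fun names => names ++ [q.2])) PySem.Dict.empty := by
    rw [List.foldl_map, List.foldl_map]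
    apply PySem.List.foldl_congr_mem
    intro d2 p hp
    simp only [hlook p hp]
    by_cases hc : d2.contains p.2 = false
    · have h0 : d2.getD p.2 [] = [] := PySem.Dict.getD_of_not_contains d2 [] hc
      simp [hc, PySem.Dict.modify, h0]
    · simp [hc]
  rw [hfold]
  set F := (l.map (fun p => (p.2, p.1))).foldl
      (fun d2 q => d2.modify q.1 [] (fun names => names ++ [q.2])) PySem.Dict.empty with hF
  -- membership in F.keys = membership among the values
  have hkeysF : ∀ x : Int, x ∈ F.keys ↔ x ∈ l.map Prod.snd := by
    intro x
    rw [← PySem.Dict.contains_iff_mem_keys, hF, pv_contains_fold]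
    simp [PySem.Dict.contains_empty, List.map_map, Function.comp_def]
  -- F's lists: getD F c [] = keys of l whose value is c, in order
  have hget : ∀ c : Int, F.getD c [] = (l.filter (fun p => p.2 == c)).map Prod.fst := by
    intro c
    rw [hF, PySem.Dict.getD_foldl_modify_append]
    simp [PySem.Dict.getD_empty, List.filter_map, List.map_map, Function.comp_def]
  -- nonemptiness
  have hvne : l.map Prod.snd ≠ [] := by simpa using hne
  have hkne : F.keys ≠ [] := by
    obtain ⟨v, hv⟩ := List.exists_mem_of_ne_nil _ hvne
    exact List.ne_nil_of_mem ((hkeysF v).mpr hv)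
  -- the two minima agree
  have hmin : (PySem.List.min? F.keys (fun y => y)).getD 0
      = (PySem.List.min? (l.map Prod.snd) (fun y => y)).getD 0 :=
    pv_min_getD_eq hkne hvne hkeysF
  set m := (PySem.List.min? (l.map Prod.snd) (fun y => y)).getD 0 with hm
  -- B's filtered key list is exactly A's list_of_names
  have hfilter : (l.map Prod.fst).filter (fun k => (PySem.Dict.mk l).getD k 0 == m)
      = (l.filter (fun p => p.2 == m)).map Prod.fst := by
    rw [List.filter_map]
    congr 1
    apply List.filter_congr
    intro p hp
    simp [hlook p hp]
  simp only [hmin, hget, ← hfilter]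
  rw [pv_fold_min_eq]

-- ===== VERDICT (by name: the statement is the Claim_ definition above) =====
theorem extract_low_priority_name_spec : Claim_equal_extract_low_priority_name := by
  intro l _ hpre
  unfold Spec_extract_low_priority_name
  exact extract_low_priority_name_main l hpre.1 hpre.2
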